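-- pv_equiv track=rewrite | github.com/KevinRSX/cleuros | test/if_while.py | FOO
-- ===== SOURCE A (Python) =====
-- def FOO(b, x):
-- 	a = 3
-- 	while b > 0:
-- 		if x == True:
-- 			a = a + 1
-- 		else:
-- 			a = a - 1
-- 		b = b - 1
-- 	return a
-- ===== SOURCE B (Python) =====
-- def FOO(b, x):
--     if b <= 0:
--         return 3
--     return 3 + b if x == True else 3 - b
-- ===== Notes on version B (the rewrite author's own statement) =====
-- stated objective: faster
-- what changed: replaced the b-iteration increment/decrement loop by a closed-form arithmetic expression 3 ± b
import Mathlib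
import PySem

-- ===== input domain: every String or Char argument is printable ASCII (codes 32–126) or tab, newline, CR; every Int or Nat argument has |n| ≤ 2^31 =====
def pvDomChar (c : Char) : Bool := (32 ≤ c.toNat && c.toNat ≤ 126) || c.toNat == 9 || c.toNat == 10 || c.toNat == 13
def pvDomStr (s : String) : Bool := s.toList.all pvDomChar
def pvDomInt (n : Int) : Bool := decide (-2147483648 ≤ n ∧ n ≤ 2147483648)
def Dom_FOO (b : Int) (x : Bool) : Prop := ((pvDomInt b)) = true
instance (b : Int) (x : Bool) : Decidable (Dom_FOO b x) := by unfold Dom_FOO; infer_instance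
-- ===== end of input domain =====

-- B replaces the b-step loop by a closed form (3 ± b); A = B is proved for all inputs.

-- ===== PORT A =====
-- literal transliteration of A's while-loop: state (a, b), step while b > 0
def FOOloop (a b : Int) (x : Bool) : Int :=
  if b > 0 then
    FOOloop (if x == true then a + 1 else a - 1) (b - 1) x
  else a
termination_by b.toNat
decreasing_by omega

def FOO (b : Int) (x : Bool) : Int := FOOloop 3 b x

-- ===== PORT B =====
def FOO_alt (b : Int) (x : Bool) : Int :=
  if b ≤ 0 then 3
  else if x == true then 3 + b else 3 - b

-- ===== PRECONDITION & SPEC =====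
def Spec_FOO (b : Int) (x : Bool) (out : Int) : Prop := out = FOO_alt b x
instance (b : Int) (x : Bool) (out : Int) : Decidable (Spec_FOO b x out) := by unfold Spec_FOO; infer_instance

-- ===== CLAIM (what is proved, stated in full; the proofs are below) =====
def Claim_equal_FOO : Prop := ∀ (b : Int) (x : Bool), Dom_FOO b x → Spec_FOO b x (FOO b x)

-- ===== LEMMAS AND PROOFS =====
theorem FOOloop_closed (a b : Int) (x : Bool) :
    FOOloop a b x = if b ≤ 0 then a else if x == true then a + b else a - b := by
  rw [FOOloop]
  by_cases hb : b > 0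
  · rw [if_pos hb, FOOloop_closed]
    cases x <;> simp <;> split_ifs <;> omega
  · rw [if_neg hb, if_pos (by omega)]
termination_by b.toNat
decreasing_by omega

-- ===== VERDICT (by name: the statement is the Claim_ definition above) =====
theorem FOO_spec : Claim_equal_FOO := by
  intro b x _
  unfold Spec_FOO FOO FOO_alt
  rw [FOOloop_closed]
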